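-- pv_equiv track=rewrite | github.com/RMANOV/My-small-educational-projects | detective_for_couples8.py | create_unique_groups_of_devices_owned_by_same_person
-- ===== SOURCE A (Python) =====
-- from collections import defaultdict
--
-- def create_unique_groups_of_devices_owned_by_same_person(owners):
--     counts = defaultdict(int)
--     for k, v in owners.items():
--         pair = tuple(([k] + v))
--         counts[pair] += 1
--
--     sorted_counts = sorted(counts.items(), key=lambda x: x[1], reverse=True)
--
--     unique_groups_owners = [x[0] for x in sorted_counts]
--
--     return unique_groups_owners
-- ===== SOURCE B (Python) =====
-- def create_unique_groups_of_devices_owned_by_same_person(owners):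
--     # Keys of a dict are unique, so every group appears once and the
--     # count-sort is a stable no-op: one direct pass suffices.
--     return [tuple([k] + v) for k, v in owners.items()]
-- ===== Notes on version B (the rewrite author's own statement) =====
-- stated objective: simpler
-- what changed: Dropped the defaultdict counting and the stable sort (dict keys are unique so every count is 1 and the count-sort is a no-op); B is a single direct pass building tuple([k]+v) per item.
import Mathlib
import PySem

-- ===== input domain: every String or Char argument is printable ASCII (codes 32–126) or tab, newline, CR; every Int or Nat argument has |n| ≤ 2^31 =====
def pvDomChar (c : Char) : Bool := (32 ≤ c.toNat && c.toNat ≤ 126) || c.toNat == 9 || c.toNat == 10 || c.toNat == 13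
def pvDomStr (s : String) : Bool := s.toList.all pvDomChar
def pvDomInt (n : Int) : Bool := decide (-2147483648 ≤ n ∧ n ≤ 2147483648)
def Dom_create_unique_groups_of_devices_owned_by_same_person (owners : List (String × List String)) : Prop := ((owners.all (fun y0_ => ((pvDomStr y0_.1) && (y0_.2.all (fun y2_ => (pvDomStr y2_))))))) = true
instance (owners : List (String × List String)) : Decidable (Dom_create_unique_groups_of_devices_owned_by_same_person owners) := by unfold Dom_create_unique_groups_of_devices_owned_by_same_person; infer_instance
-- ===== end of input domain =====

-- B drops A's dead counting dict and no-op stable sort: a single direct pass (objective: simpler).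


-- ===== PORT A =====
def create_unique_groups_of_devices_owned_by_same_person (owners : List (String × List String)) : List (List String) :=
  let counts : PySem.Dict (List String) Int :=
    owners.foldl (fun d kv => d.modify (kv.1 :: kv.2) 0 (· + 1)) PySem.Dict.empty
  let sorted_counts := PySem.List.sorted counts.items (fun x => x.2) true
  sorted_counts.map (fun x => x.1)

-- ===== PORT B =====
def create_unique_groups_of_devices_owned_by_same_person_alt (owners : List (String × List String)) : List (List String) :=
  owners.map (fun kv => kv.1 :: kv.2)

-- ===== PRECONDITION & SPEC =====
-- Pre_: the argument is a Python dict, so its keys are distinct; a Lean association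
-- list with duplicate keys corresponds to no dict input A can receive.
def Pre_create_unique_groups_of_devices_owned_by_same_person (owners : List (String × List String)) : Prop :=
  (owners.map Prod.fst).Nodup
instance (owners : List (String × List String)) : Decidable (Pre_create_unique_groups_of_devices_owned_by_same_person owners) := by unfold Pre_create_unique_groups_of_devices_owned_by_same_person; infer_instance
def pvWitness_create_unique_groups_of_devices_owned_by_same_person : (List (String × List String)) := [("a", ["d1", "d2"]), ("b", [])]

def Spec_create_unique_groups_of_devices_owned_by_same_person (owners : List (String × List String)) (out : List (List String)) : Prop := out = create_unique_groups_of_devices_owned_by_same_person_alt owners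
instance (owners : List (String × List String)) (out : List (List String)) : Decidable (Spec_create_unique_groups_of_devices_owned_by_same_person owners out) := by unfold Spec_create_unique_groups_of_devices_owned_by_same_person; infer_instance

-- ===== CLAIM (what is proved, stated in full; the proofs are below) =====
def Claim_equal_create_unique_groups_of_devices_owned_by_same_person : Prop := ∀ (owners : List (String × List String)), Dom_create_unique_groups_of_devices_owned_by_same_person owners → Pre_create_unique_groups_of_devices_owned_by_same_person owners → Spec_create_unique_groups_of_devices_owned_by_same_person owners (create_unique_groups_of_devices_owned_by_same_person owners)

-- ===== LEMMAS AND PROOFS =====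

-- the group lists built from a duplicate-free key list are themselves duplicate-free
lemma pv_pairs_nodup (owners : List (String × List String))
    (h : (owners.map Prod.fst).Nodup) :
    (owners.map (fun kv => kv.1 :: kv.2)).Nodup := by
  have h2 : ((owners.map (fun kv => kv.1 :: kv.2)).map (fun l => l.head?)).Nodup := by
    simpa [List.map_map, Function.comp] using h.map (Option.some_injective String)
  exact List.Nodup.of_map _ h2

-- the counting loop over distinct pairs yields each pair with count 1, in order
lemma pv_items_eq (xs : List (List String)) (h : xs.Nodup) :
    (xs.foldl (fun d x => d.modify x 0 (· + 1)) PySem.Dict.empty).items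
      = xs.map (fun k => (k, (1 : Int))) := by
  have hc : (xs.foldl (fun d x => d.modify x 0 (· + 1)) PySem.Dict.empty)
      = PySem.Dict.counter xs := (PySem.Dict.counter_eq_foldl xs).symm
  rw [hc, PySem.Dict.items_counter]
  rw [PySem.Set.ofList_eq_self_of_nodup xs h]
  apply List.map_congr_left
  intro k hk
  simp [List.count_eq_one_of_mem h hk]

-- ===== VERDICT (by name: the statement is the Claim_ definition above) =====
theorem create_unique_groups_of_devices_owned_by_same_person_spec : Claim_equal_create_unique_groups_of_devices_owned_by_same_person := by
  intro owners _ hpre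
  unfold Spec_create_unique_groups_of_devices_owned_by_same_person
  simp only [create_unique_groups_of_devices_owned_by_same_person,
    create_unique_groups_of_devices_owned_by_same_person_alt]
  rw [← List.foldl_map (f := fun kv : String × List String => kv.1 :: kv.2)
    (g := fun (d : PySem.Dict (List String) Int) x => d.modify x 0 (· + 1))]
  rw [pv_items_eq _ (pv_pairs_nodup owners hpre)]
  have hsorted : PySem.List.sorted ((owners.map (fun kv => kv.1 :: kv.2)).map (fun k => (k, (1 : Int)))) (fun x => x.2) true
      = (owners.map (fun kv => kv.1 :: kv.2)).map (fun k => (k, (1 : Int))) := by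
    apply PySem.List.sorted_rev_eq_self_of_pairwise
    rw [List.pairwise_map]
    exact List.pairwise_of_forall fun _ _ => le_refl _
  rw [hsorted]
  simp [List.map_map, Function.comp]
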